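-- pv_equiv track=rewrite | github.com/JoyKuan/Leetcode_SQL | 383-ransom-note/ransom-note.py | canConstruct
-- ===== SOURCE A (Python) =====
-- from collections import Counter
--
-- def canConstruct(ransomNote: str, magazine: str) -> bool:
--     note = Counter(ransomNote)
--     mag = Counter(magazine)
--
--     count = 0
--     for k, v in note.items():
--         if mag[k] >= v:
--             count+=1
--
--     if count == len(note):
--         return True
--     else:
--         return False
-- ===== SOURCE B (Python) =====
-- def canConstruct(ransomNote: str, magazine: str) -> bool:
--     supply = {}
--     for ch in magazine:
--         supply[ch] = supply.get(ch, 0) + 1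
--     for ch in ransomNote:
--         if supply.get(ch, 0) <= 0:
--             return False
--         supply[ch] = supply.get(ch, 0) - 1
--     return True
-- ===== Notes on version B (the rewrite author's own statement) =====
-- stated objective: simpler
-- what changed: Instead of building two full Counters and comparing them key by key afterwards, B builds one supply table from the magazine and consumes it in a single scan of ransomNote with an early False exit.
import Mathlib
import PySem

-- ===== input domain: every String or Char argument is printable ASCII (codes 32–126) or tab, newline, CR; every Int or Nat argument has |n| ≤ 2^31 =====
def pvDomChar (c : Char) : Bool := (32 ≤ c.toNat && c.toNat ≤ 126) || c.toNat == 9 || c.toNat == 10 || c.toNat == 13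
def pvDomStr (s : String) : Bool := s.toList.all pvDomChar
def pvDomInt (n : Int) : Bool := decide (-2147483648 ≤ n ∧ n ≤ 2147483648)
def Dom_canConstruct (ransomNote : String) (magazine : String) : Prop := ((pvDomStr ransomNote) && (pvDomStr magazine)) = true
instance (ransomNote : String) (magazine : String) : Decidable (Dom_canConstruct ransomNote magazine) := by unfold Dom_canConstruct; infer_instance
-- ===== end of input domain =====

-- B changes the decomposition: one supply table from the magazine, consumed in a single
-- scan of ransomNote with early exit, instead of two Counters compared key by key.

-- ===== PORT A =====
def canConstruct (ransomNote : String) (magazine : String) : Bool :=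
  let note := PySem.Dict.counter ransomNote.toList
  let mag := PySem.Dict.counter magazine.toList
  let count : Int :=
    note.items.foldl (fun count kv => if mag.getD kv.1 0 ≥ kv.2 then count + 1 else count) 0
  if count = (note.items.length : Int) then true else false

-- ===== PORT B =====
-- the ransomNote scan: consume one letter of supply per character, early False
def pvConsume (supply : PySem.Dict Char Int) : List Char → Bool
  | [] => true
  | c :: rest =>
      if supply.getD c 0 ≤ 0 then false
      else pvConsume (supply.insert c (supply.getD c 0 - 1)) rest

def canConstruct_alt (ransomNote : String) (magazine : String) : Bool :=
  let supply := magazine.toList.foldl (fun d ch => d.insert ch (d.getD ch 0 + 1)) PySem.Dict.empty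
  pvConsume supply ransomNote.toList

-- ===== PRECONDITION & SPEC =====
def Spec_canConstruct (ransomNote : String) (magazine : String) (out : Bool) : Prop := out = canConstruct_alt ransomNote magazine
instance (ransomNote : String) (magazine : String) (out : Bool) : Decidable (Spec_canConstruct ransomNote magazine out) := by unfold Spec_canConstruct; infer_instance

-- ===== CLAIM (what is proved, stated in full; the proofs are below) =====
def Claim_equal_canConstruct : Prop := ∀ (ransomNote : String) (magazine : String), Dom_canConstruct ransomNote magazine → Spec_canConstruct ransomNote magazine (canConstruct ransomNote magazine)

-- ===== LEMMAS AND PROOFS =====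

-- the scan succeeds iff every character of the remaining note still has supply for all its occurrences
lemma pvConsume_iff (rs : List Char) (s : PySem.Dict Char Int) :
    pvConsume s rs = decide (∀ c ∈ rs, (rs.count c : Int) ≤ s.getD c 0) := by
  induction rs generalizing s with
  | nil => simp [pvConsume]
  | cons c rest ih =>
    by_cases h : s.getD c 0 ≤ 0
    · rw [pvConsume, if_pos h]
      symm
      simp only [decide_eq_false_iff_not]
      intro hall
      have := hall c (List.mem_cons_self)
      simp only [List.count_cons_self] at this
      push_cast at this
      omega
    · rw [pvConsume, if_neg h, ih]
      congr 1
      apply propext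
      constructor
      · intro hp d hd
        by_cases hdc : d = c
        · subst hdc
          by_cases hmem : d ∈ rest
          · have := hp d hmem
            rw [PySem.Dict.getD_insert_self] at this
            simp only [List.count_cons_self]
            push_cast
            omega
          · simp [List.count_cons_self, List.count_eq_zero_of_not_mem hmem]
            omega
        · have hd' : d ∈ rest := by
            rcases List.mem_cons.mp hd with h1 | h1
            · exact absurd h1 hdc
            · exact h1
          have := hp d hd'
          rw [PySem.Dict.getD_insert_of_ne _ _ _ hdc] at this
          simpa [List.count_cons_of_ne (Ne.symm hdc)] using this
      · intro hp d hd
        by_cases hdc : d = c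
        · subst hdc
          have := hp d (List.mem_cons_self)
          rw [PySem.Dict.getD_insert_self]
          simp only [List.count_cons_self] at this
          push_cast at this ⊢
          omega
        · rw [PySem.Dict.getD_insert_of_ne _ _ _ hdc]
          have := hp d (List.mem_cons_of_mem _ hd)
          simpa [List.count_cons_of_ne (Ne.symm hdc)] using this

lemma pvFoldCount {α : Type} (p : α → Prop) [DecidablePred p] (l : List α) (acc : Int) :
    l.foldl (fun n kv => if p kv then n + 1 else n) acc
      = acc + (l.countP (fun x => decide (p x)) : Int) := by
  induction l generalizing acc with
  | nil => simp
  | cons x xs ih =>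
    simp only [List.foldl_cons, List.countP_cons, ih]
    by_cases hx : p x
    · simp only [if_pos hx, decide_eq_true hx]
      push_cast
      ring
    · simp [hx]

-- ===== VERDICT (by name: the statement is the Claim_ definition above) =====
theorem canConstruct_spec : Claim_equal_canConstruct := by
  intro ransomNote magazine _
  unfold Spec_canConstruct canConstruct canConstruct_alt
  rw [PySem.Dict.foldl_insert_getD_add_one_eq_counter, pvConsume_iff]
  simp only [PySem.Dict.getD_counter]
  set rn := ransomNote.toList
  set mg := magazine.toList
  rw [pvFoldCount (fun kv : Char × Int => ((List.count kv.1 mg : Int) ≥ kv.2))]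
  simp only [PySem.Dict.items_counter, zero_add, List.countP_map, List.length_map,
    Int.natCast_inj, Function.comp_def]
  have hiff : (List.countP (fun k => decide ((List.count k mg : Int) ≥ (List.count k rn : Int)))
        (PySem.Set.ofList rn) = (PySem.Set.ofList rn).length)
      ↔ (∀ c ∈ rn, (List.count c rn : Int) ≤ (List.count c mg : Int)) := by
    rw [List.countP_eq_length]
    constructor
    · intro h c hc
      have := h c ((PySem.Set.mem_ofList rn c).mpr hc)
      simpa using this
    · intro h k hk
      simpa using h k ((PySem.Set.mem_ofList rn k).mp hk)
  by_cases h : ∀ c ∈ rn, (List.count c rn : Int) ≤ (List.count c mg : Int)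
  · rw [if_pos (hiff.mpr h)]
    symm
    simp only [decide_eq_true_eq]
    exact h
  · rw [if_neg (fun hc => h (hiff.mp hc))]
    symm
    simp only [decide_eq_false_iff_not]
    exact h
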